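-- pv_equiv track=rewrite | github.com/hoangduy0308/C-Vul-Devign | devign_pipeline/src/slicing/utils.py | find_defense_lines
-- ===== SOURCE A (Python) =====
-- from typing import List, Set
--
-- DEFENSE_TOKENS: Set[str] = {
--     'return', 'goto', 'break', 'continue', 'free', 'close',
--     'unlock', 'error', 'NULL', 'EINVAL', 'assert', 'panic',
--     'kfree', 'release', 'destroy', 'cleanup', 'fail'
-- }
--
-- def is_defense_line(line: str, defense_tokens: Set[str] = None) -> bool:
--     """Check if a line contains defense tokens (error handling, cleanup, etc.).
--
--     Args:
--         line: Source line to check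
--         defense_tokens: Optional custom set of defense tokens.
--                        Defaults to DEFENSE_TOKENS.
--
--     Returns:
--         True if line contains any defense token.
--     """
--     if defense_tokens is None:
--         defense_tokens = DEFENSE_TOKENS
--
--     line_lower = line.lower()
--     for token in defense_tokens:
--         if token.lower() in line_lower:
--             return True
--     return False
--
-- def find_defense_lines(code: str, defense_tokens: Set[str] = None) -> List[int]:
--     """Find all lines containing defense tokens.
--
--     Args:
--         code: Source code string to analyze
--         defense_tokens: Optional custom set of defense tokens.
--
--     Returns:
--         List of 1-indexed line numbers containing defense tokens.
--     """
--     if defense_tokens is None: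
--         defense_tokens = DEFENSE_TOKENS
--
--     lines = code.split('\n')
--     defense_lines = []
--     for i, line in enumerate(lines, 1):
--         if is_defense_line(line, defense_tokens):
--             defense_lines.append(i)
--     return defense_lines
-- ===== SOURCE B (Python) =====
-- from typing import List, Set
--
-- DEFENSE_TOKENS: Set[str] = {
--     'return', 'goto', 'break', 'continue', 'free', 'close',
--     'unlock', 'error', 'NULL', 'EINVAL', 'assert', 'panic',
--     'kfree', 'release', 'destroy', 'cleanup', 'fail'
-- }
--
-- def find_defense_lines(code: str, defense_tokens: Set[str] = None) -> List[int]: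
--     """Token-outer scan: for each token, collect the 1-indexed lines containing it,
--     dropping matched lines from further scans; return the sorted union."""
--     if defense_tokens is None:
--         defense_tokens = DEFENSE_TOKENS
--     remaining = list(enumerate((line.lower() for line in code.split('\n')), 1))
--     hits = set()
--     for tok in defense_tokens:
--         t = tok.lower()
--         still = []
--         for i, line in remaining:
--             if t in line:
--                 hits.add(i)
--             else:
--                 still.append((i, line))
--         remaining = still
--     return sorted(hits)
-- ===== Notes on version B (the rewrite author's own statement) =====
-- stated objective: alternative
-- what changed: Inverts the loop nesting: instead of scanning tokens per line with an early exit and appending line numbers in order, B lowercases the lines once, scans the still-unmatched lines per token (matched lines drop out of later scans) collecting 1-indexed positions into a set, and returns the sorted set.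
import Mathlib
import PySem

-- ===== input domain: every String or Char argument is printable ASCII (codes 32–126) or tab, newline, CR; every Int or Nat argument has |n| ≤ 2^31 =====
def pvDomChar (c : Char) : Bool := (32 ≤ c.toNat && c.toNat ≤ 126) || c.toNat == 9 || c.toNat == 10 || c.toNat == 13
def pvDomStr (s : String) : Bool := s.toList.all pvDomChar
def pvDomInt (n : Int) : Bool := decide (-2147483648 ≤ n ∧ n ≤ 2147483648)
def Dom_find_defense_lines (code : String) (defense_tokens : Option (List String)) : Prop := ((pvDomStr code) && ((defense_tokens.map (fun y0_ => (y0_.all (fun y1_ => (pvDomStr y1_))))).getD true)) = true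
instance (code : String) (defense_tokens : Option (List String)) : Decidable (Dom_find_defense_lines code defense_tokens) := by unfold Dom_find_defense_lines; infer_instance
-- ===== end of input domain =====

-- B restructures A: a token-outer scan over once-lowered lines, dropping matched lines from later scans,
-- collecting hit line numbers into a set that is sorted at the end ('alternative'; same exact result).

-- ===== PORT A =====
def DEFENSE_TOKENS : PySem.Set String := PySem.Set.ofList
  ["return", "goto", "break", "continue", "free", "close",
   "unlock", "error", "NULL", "EINVAL", "assert", "panic",
   "kfree", "release", "destroy", "cleanup", "fail"]

def is_defense_line (line : String) (defense_tokens : Option (List String)) : Bool :=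
  let toks := defense_tokens.getD DEFENSE_TOKENS
  let line_lower := PySem.Str.lower line
  -- 'for token in toks: if token.lower() in line_lower: return True / return False'
  toks.any (fun token => PySem.Str.isIn (PySem.Str.lower token) line_lower)

def find_defense_lines (code : String) (defense_tokens : Option (List String)) : List Int :=
  let dt := defense_tokens.getD DEFENSE_TOKENS
  let lines := (PySem.Str.split? code "\n").getD []   -- sep "\n" ≠ "": split? is always some here
  (PySem.List.enumerate lines 1).foldl
    (fun acc p => if is_defense_line p.2 (some dt) then acc ++ [p.1] else acc) []

-- ===== PORT B =====
def find_defense_lines_alt (code : String) (defense_tokens : Option (List String)) : List Int :=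
  let dt := defense_tokens.getD DEFENSE_TOKENS
  let remaining := PySem.List.enumerate (((PySem.Str.split? code "\n").getD []).map PySem.Str.lower) 1
  -- state = (hits, remaining); per token, matched lines go to hits, the rest to the next 'remaining'
  let final := dt.foldl
    (fun st tok =>
      let t := PySem.Str.lower tok
      st.2.foldl
        (fun acc p =>
          if PySem.Str.isIn t p.2 then (PySem.Set.add acc.1 p.1, acc.2)
          else (acc.1, acc.2 ++ [p]))
        (st.1, ([] : List (Int × String))))
    ((PySem.Set.empty : PySem.Set Int), remaining)
  PySem.List.sorted final.1 (fun x => x) false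

-- ===== PRECONDITION & SPEC =====
def Spec_find_defense_lines (code : String) (defense_tokens : Option (List String)) (out : List Int) : Prop := out = find_defense_lines_alt code defense_tokens
instance (code : String) (defense_tokens : Option (List String)) (out : List Int) : Decidable (Spec_find_defense_lines code defense_tokens out) := by unfold Spec_find_defense_lines; infer_instance

-- ===== CLAIM (what is proved, stated in full; the proofs are below) =====
def Claim_equal_find_defense_lines : Prop := ∀ (code : String) (defense_tokens : Option (List String)), Dom_find_defense_lines code defense_tokens → Spec_find_defense_lines code defense_tokens (find_defense_lines code defense_tokens)

-- ===== LEMMAS AND PROOFS =====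

-- B's inner loop in closed form: hits get the matching firsts, 'still' keeps the non-matching pairs
theorem innerFold_eq (c : Int × String → Bool) (r : List (Int × String))
    (h : PySem.Set Int) (l : List (Int × String)) :
    r.foldl
        (fun acc p => if c p then (PySem.Set.add acc.1 p.1, acc.2) else (acc.1, acc.2 ++ [p]))
        (h, l) =
      ((r.filter c).foldl (fun s p => PySem.Set.add s p.1) h, l ++ r.filter (fun p => !c p)) := by
  induction r generalizing h l with
  | nil => simp
  | cons q r ih =>
    by_cases hq : c q = true
    · simp [hq, ih]
    · simp [hq, ih]

theorem foldl_add_mem (r : List (Int × String)) (h : PySem.Set Int) (i : Int) :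
    i ∈ r.foldl (fun s p => PySem.Set.add s p.1) h ↔ i ∈ h ∨ ∃ p ∈ r, p.1 = i := by
  induction r generalizing h with
  | nil => simp
  | cons q r ih =>
    simp only [List.foldl_cons, ih, PySem.Set.mem_add, List.mem_cons]
    constructor
    · rintro (⟨hs | rfl⟩ | ⟨p, hp, rfl⟩)
      · exact Or.inl hs
      · exact Or.inr ⟨q, Or.inl rfl, rfl⟩
      · exact Or.inr ⟨p, Or.inr hp, rfl⟩
    · rintro (hs | ⟨p, (rfl | hp), rfl⟩)
      · exact Or.inl (Or.inl hs)
      · exact Or.inl (Or.inr rfl)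
      · exact Or.inr ⟨p, hp, rfl⟩

theorem foldl_add_nodup (r : List (Int × String)) (h : PySem.Set Int) (hh : h.Nodup) :
    (r.foldl (fun s p => PySem.Set.add s p.1) h).Nodup := by
  induction r generalizing h with
  | nil => exact hh
  | cons q r ih => exact ih _ (PySem.Set.nodup_add _ _ hh)

-- B's outer loop: the hit set collects exactly the line numbers some token matches
theorem outerFold_mem (toks : List String) (cond : String → Int × String → Bool)
    (rem : List (Int × String)) (h : PySem.Set Int) (i : Int) :
    i ∈ (toks.foldl
        (fun st tok =>
          st.2.foldl
            (fun acc p => if cond tok p then (PySem.Set.add acc.1 p.1, acc.2) else (acc.1, acc.2 ++ [p]))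
            (st.1, ([] : List (Int × String))))
        (h, rem)).1 ↔
      i ∈ h ∨ ∃ tok ∈ toks, ∃ p ∈ rem, cond tok p = true ∧ p.1 = i := by
  induction toks generalizing h rem with
  | nil => simp
  | cons tok toks ih =>
    rw [List.foldl_cons, innerFold_eq, List.nil_append, ih, foldl_add_mem]
    simp only [List.mem_cons, List.mem_filter]
    constructor
    · rintro ((hs | ⟨p, ⟨hp, hc⟩, rfl⟩) | ⟨t, ht, p, ⟨hp, _⟩, hc, rfl⟩)
      · exact Or.inl hs
      · exact Or.inr ⟨tok, Or.inl rfl, p, hp, hc, rfl⟩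
      · exact Or.inr ⟨t, Or.inr ht, p, hp, hc, rfl⟩
    · rintro (hs | ⟨t, (rfl | ht), p, hp, hc, rfl⟩)
      · exact Or.inl (Or.inl hs)
      · exact Or.inl (Or.inr ⟨p, ⟨hp, hc⟩, rfl⟩)
      · by_cases hm : cond tok p = true
        · exact Or.inl (Or.inr ⟨p, ⟨hp, hm⟩, rfl⟩)
        · exact Or.inr ⟨t, ht, p, ⟨hp, by simp [hm]⟩, hc, rfl⟩

theorem outerFold_nodup (toks : List String) (cond : String → Int × String → Bool)
    (rem : List (Int × String)) (h : PySem.Set Int) (hh : h.Nodup) :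
    ((toks.foldl
        (fun st tok =>
          st.2.foldl
            (fun acc p => if cond tok p then (PySem.Set.add acc.1 p.1, acc.2) else (acc.1, acc.2 ++ [p]))
            (st.1, ([] : List (Int × String))))
        (h, rem)).1).Nodup := by
  induction toks generalizing h rem with
  | nil => exact hh
  | cons tok toks ih =>
    rw [List.foldl_cons, innerFold_eq, List.nil_append]
    exact ih _ _ (foldl_add_nodup _ _ hh)

-- ===== VERDICT (by name: the statement is the Claim_ definition above) =====
theorem find_defense_lines_spec : Claim_equal_find_defense_lines := by
  intro code defense_tokens _
  unfold Spec_find_defense_lines find_defense_lines find_defense_lines_alt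
  set dt := defense_tokens.getD DEFENSE_TOKENS with hdt
  set lines := (PySem.Str.split? code "\n").getD [] with hlines
  rw [PySem.List.foldl_append_if]
  set enumA := PySem.List.enumerate lines 1 with henumA
  have henum : PySem.List.enumerate (lines.map PySem.Str.lower) 1 =
      enumA.map (fun p => (p.1, PySem.Str.lower p.2)) := by
    rw [henumA]
    generalize (1 : Int) = s
    induction lines generalizing s with
    | nil => simp [PySem.List.enumerate]
    | cons l ls ih => simp [PySem.List.enumerate_cons, ih]
  set la := (enumA.filter (fun p => is_defense_line p.2 (some dt))).map (fun p => p.1) with hla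
  have hpw : la.Pairwise (· < ·) := by
    rw [hla]
    exact (List.Pairwise.filter _ (PySem.List.pairwise_lt_enumerate lines 1)).map _ (fun _ _ h => h)
  have hperm : la.Perm (dt.foldl
      (fun st tok =>
        st.2.foldl
          (fun acc p =>
            if PySem.Str.isIn (PySem.Str.lower tok) p.2 then (PySem.Set.add acc.1 p.1, acc.2)
            else (acc.1, acc.2 ++ [p]))
          (st.1, ([] : List (Int × String))))
      ((PySem.Set.empty : PySem.Set Int),
        PySem.List.enumerate (lines.map PySem.Str.lower) 1)).1 := by
    refine (List.perm_ext_iff_of_nodup hpw.nodup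
      (outerFold_nodup dt (fun tok p => PySem.Str.isIn (PySem.Str.lower tok) p.2) _ _ List.nodup_nil)).mpr ?_
    intro i
    simp only [outerFold_mem, henum]
    simp only [List.not_mem_nil, false_or, hla, List.mem_map, List.mem_filter,
      is_defense_line, List.any_eq_true]
    constructor
    · rintro ⟨p, ⟨hp, tok, ht, hc⟩, rfl⟩
      exact ⟨tok, ht, (p.1, PySem.Str.lower p.2), ⟨p, hp, rfl⟩, hc, rfl⟩
    · rintro ⟨tok, ht, q, ⟨p, hp, rfl⟩, hc, hi⟩
      exact ⟨p, ⟨hp, tok, ht, hc⟩, hi⟩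
  exact (PySem.List.sorted_eq_of_perm_of_pairwise_lt _ la (fun x => x) hperm hpw).symm
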